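-- pv_equiv track=rewrite | github.com/Batuka95/shared-knowlege | Retinue (1).py | filter_anomalies
-- ===== SOURCE A (Python) =====
-- def filter_anomalies(anomaly_list):
--     filtered_list = []  # List to store the filtered anomalies
--     found_medium_or_small = False  # Flag to track if "Medium" or "Small" has been found
--
--     for anomaly in anomaly_list:
--         if found_medium_or_small and anomaly == "Large":
--             break  # Stop adding to the list once a "Large" is found after "Medium" or "Small"
--         filtered_list.append(anomaly)
--         if anomaly in ["Medium", "Small"]:
--             found_medium_or_small = True  # Set flag once "Medium" or "Small" is encountered
--
--     return filtered_list
-- ===== SOURCE B (Python) =====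
-- def filter_anomalies(anomaly_list):
--     m = next((i for i, x in enumerate(anomaly_list) if x in ("Medium", "Small")), None)
--     if m is None:
--         return list(anomaly_list)
--     for j in range(m + 1, len(anomaly_list)):
--         if anomaly_list[j] == "Large":
--             return anomaly_list[:j]
--     return list(anomaly_list)
-- ===== Notes on version B (the rewrite author's own statement) =====
-- stated objective: alternative
-- what changed: B computes the cut boundary first (index of first Medium/Small, then first Large strictly after it) and returns a single slice, instead of A's element-by-element accumulation with a flag and break.
import Mathlib
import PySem

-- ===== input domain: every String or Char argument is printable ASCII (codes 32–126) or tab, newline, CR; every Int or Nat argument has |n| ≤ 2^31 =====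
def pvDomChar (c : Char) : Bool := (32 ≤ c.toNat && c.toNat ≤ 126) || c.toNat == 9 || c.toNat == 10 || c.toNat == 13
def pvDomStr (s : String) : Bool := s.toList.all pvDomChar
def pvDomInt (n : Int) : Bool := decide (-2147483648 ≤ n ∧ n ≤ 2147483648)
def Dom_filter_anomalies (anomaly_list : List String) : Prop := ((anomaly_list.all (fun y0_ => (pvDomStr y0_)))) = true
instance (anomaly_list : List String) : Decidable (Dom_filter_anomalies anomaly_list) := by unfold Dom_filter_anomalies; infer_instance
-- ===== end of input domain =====

-- B computes the cut boundary first (index of first "Medium"/"Small", then first "Large"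
-- strictly after it) and returns a single slice, instead of A's accumulation with a flag.

-- ===== PORT A =====
-- the for-loop with its break and flag, as structural recursion over the list with the flag as state
def filterAnomaliesLoop : List String → Bool → List String
  | [], _ => []
  | a :: rest, flag =>
      if flag && a == "Large" then []
      else a :: filterAnomaliesLoop rest (flag || (a == "Medium" || a == "Small"))

def filter_anomalies (anomaly_list : List String) : List String :=
  filterAnomaliesLoop anomaly_list false

-- ===== PORT B =====
def filter_anomalies_alt (anomaly_list : List String) : List String :=
  match anomaly_list.findIdx? (fun x => x == "Medium" || x == "Small") with
  | none => anomaly_list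
  | some m =>
      match (anomaly_list.drop (m + 1)).findIdx? (fun x => x == "Large") with
      | none => anomaly_list
      | some k => anomaly_list.take (m + 1 + k)

-- ===== PRECONDITION & SPEC =====
def Spec_filter_anomalies (anomaly_list : List String) (out : List String) : Prop := out = filter_anomalies_alt anomaly_list
instance (anomaly_list : List String) (out : List String) : Decidable (Spec_filter_anomalies anomaly_list out) := by unfold Spec_filter_anomalies; infer_instance

-- ===== CLAIM (what is proved, stated in full; the proofs are below) =====
def Claim_equal_filter_anomalies : Prop := ∀ (anomaly_list : List String), Dom_filter_anomalies anomaly_list → Spec_filter_anomalies anomaly_list (filter_anomalies anomaly_list)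

-- ===== LEMMAS AND PROOFS =====

-- once the flag is set, A keeps elements up to the first "Large"
theorem loop_true_eq (l : List String) :
    filterAnomaliesLoop l true =
      match l.findIdx? (fun x => x == "Large") with
      | none => l
      | some k => l.take k := by
  induction l with
  | nil => simp [filterAnomaliesLoop]
  | cons a rest ih =>
      by_cases h : a = "Large"
      · simp [filterAnomaliesLoop, h, List.findIdx?_cons]
      · simp [filterAnomaliesLoop, h, List.findIdx?_cons, ih]
        cases hk : rest.findIdx? (fun x => x == "Large") <;> simp

theorem loop_false_eq (l : List String) :
    filterAnomaliesLoop l false = filter_anomalies_alt l := by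
  induction l with
  | nil => simp [filterAnomaliesLoop, filter_anomalies_alt]
  | cons a rest ih =>
      by_cases h : a = "Medium" ∨ a = "Small"
      · have hb : (a == "Medium" || a == "Small") = true := by
          rcases h with h | h <;> simp [h]
        simp [filterAnomaliesLoop, hb, filter_anomalies_alt, List.findIdx?_cons,
          loop_true_eq]
        cases hk : rest.findIdx? (fun x => x == "Large") with
        | none => simp
        | some k => simp [Nat.add_comm 1 k, List.take_succ_cons]
      · have h1 : a ≠ "Medium" := fun ha => h (Or.inl ha)
        have h2 : a ≠ "Small" := fun ha => h (Or.inr ha)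
        have hb : (a == "Medium" || a == "Small") = false := by simp [h1, h2]
        have hA : filterAnomaliesLoop (a :: rest) false
            = a :: filterAnomaliesLoop rest false := by
          simp [filterAnomaliesLoop, hb]
        rw [hA, ih]
        unfold filter_anomalies_alt
        rw [List.findIdx?_cons]
        simp only [hb, Bool.false_eq_true, if_false]
        cases hm : rest.findIdx? (fun x => x == "Medium" || x == "Small") with
        | none => simp
        | some m =>
            simp only [Option.map_some]
            have hd : (a :: rest).drop (m + 1 + 1) = rest.drop (m + 1) := rfl
            rw [hd]
            cases hk : (rest.drop (m + 1)).findIdx? (fun x => x == "Large") with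
            | none => rfl
            | some k =>
                show a :: rest.take (m + 1 + k) = (a :: rest).take (m + 1 + 1 + k)
                have : m + 1 + 1 + k = (m + 1 + k) + 1 := by omega
                rw [this, List.take_succ_cons]

-- ===== VERDICT (by name: the statement is the Claim_ definition above) =====
theorem filter_anomalies_spec : Claim_equal_filter_anomalies := by
  intro l _
  unfold Spec_filter_anomalies filter_anomalies
  exact loop_false_eq l
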